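-- pv_equiv track=rewrite | github.com/sthetix/nx-cheats-db | fetch_extra_sources.py | parse_cheat_txt
-- ===== SOURCE A (Python) =====
-- from collections import OrderedDict
--
-- def parse_cheat_txt(content: str) -> OrderedDict:
--     """Parse a standard .txt cheat file into {[Name]: [Name]\nCODE\n\n}."""
--     out = OrderedDict()
--     current_key = None
--     current_lines = []
--
--     def flush():
--         if current_key and len(current_lines) > 1:
--             out[current_key] = "\n".join(current_lines).strip() + "\n\n"
--
--     for line in content.splitlines():
--         s = line.strip()
--         if not s:
--             continue
--         is_header = (s.startswith("[") and s.endswith("]")) or \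
--                     (s.startswith("{") and s.endswith("}"))
--         if is_header:
--             flush()
--             current_key = s
--             current_lines = [s]
--         elif current_key:
--             current_lines.append(s)
--
--     flush()
--     return out
-- ===== SOURCE B (Python) =====
-- from collections import OrderedDict
--
-- def parse_cheat_txt(content: str) -> OrderedDict:
--     """Parse a standard .txt cheat file into {[Name]: [Name]\nCODE\n\n}."""
--     # Pass 1: segment the stripped, non-empty lines at headers.
--     segments = []
--     for line in content.splitlines():
--         s = line.strip()
--         if not s:
--             continue
--         if (s.startswith("[") and s.endswith("]")) or \
--            (s.startswith("{") and s.endswith("}")):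
--             segments.append([s])
--         elif segments:
--             segments[-1].append(s)
--     # Pass 2: build the mapping from segments that carry code lines.
--     out = OrderedDict()
--     for seg in segments:
--         if len(seg) > 1:
--             out[seg[0]] = "\n".join(seg).strip() + "\n\n"
--     return out
-- ===== Notes on version B (the rewrite author's own statement) =====
-- stated objective: alternative
-- what changed: Replaces A's single pass with a flush() closure and mutable current_key/current_lines state by two passes: first segment the stripped non-empty lines at headers into an ordered list of segments, then build the mapping from the segments with more than one line.
import Mathlib
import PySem

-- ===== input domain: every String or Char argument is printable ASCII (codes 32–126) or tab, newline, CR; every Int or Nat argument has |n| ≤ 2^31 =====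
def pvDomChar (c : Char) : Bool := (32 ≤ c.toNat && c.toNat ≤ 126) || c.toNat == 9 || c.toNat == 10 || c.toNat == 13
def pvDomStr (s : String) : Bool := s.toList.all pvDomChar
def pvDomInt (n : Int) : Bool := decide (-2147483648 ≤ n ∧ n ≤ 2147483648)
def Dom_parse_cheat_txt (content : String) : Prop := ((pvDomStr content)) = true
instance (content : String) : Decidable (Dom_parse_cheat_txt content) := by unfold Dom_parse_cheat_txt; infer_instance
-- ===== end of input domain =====

-- B replaces A's flush-closure single pass by explicit segmentation (cut lines at headers) followed by a separate build pass; objective: alternative decomposition, same cost.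


-- ===== PORT A =====
-- shared header test: s starts/ends with [] or {}
def pvIsHeader (s : String) : Bool :=
  (PySem.Str.startswith s "[" && PySem.Str.endswith s "]") ||
  (PySem.Str.startswith s "{" && PySem.Str.endswith s "}")

-- flush(): 'if current_key and len(current_lines) > 1' — Python truthiness of the
-- Optional[str] current_key is 'some k with k ≠ ""'
def pvFlushA (out : PySem.Dict String String) (ck : Option String) (cl : List String) :
    PySem.Dict String String :=
  match ck with
  | some k =>
      if k ≠ "" ∧ cl.length > 1 then
        out.insert k (PySem.Str.strip (PySem.Str.join "\n" cl) ++ "\n\n")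
      else out
  | none => out

-- one iteration of A's loop over content.splitlines(); state = (out, current_key, current_lines)
def pvStepA (st : PySem.Dict String String × Option String × List String) (line : String) :
    PySem.Dict String String × Option String × List String :=
  let s := PySem.Str.strip line
  if s = "" then st
  else if pvIsHeader s then (pvFlushA st.1 st.2.1 st.2.2, some s, [s])
  else
    match st.2.1 with
    | some k => if k ≠ "" then (st.1, st.2.1, st.2.2 ++ [s]) else st  -- 'elif current_key:'
    | none => st

def parse_cheat_txt (content : String) : List (String × String) :=
  let st := (PySem.Str.splitlines content).foldl pvStepA (PySem.Dict.empty, none, [])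
  (pvFlushA st.1 st.2.1 st.2.2).items

-- ===== PORT B =====
-- pass 1 body: start a new segment at a header, else append to the last segment ('segments[-1]')
def pvStepSeg (segs : List (List String)) (line : String) : List (List String) :=
  let s := PySem.Str.strip line
  if s = "" then segs
  else if pvIsHeader s then segs ++ [[s]]
  else if segs ≠ [] then segs.dropLast ++ [PySem.List.pyGetD segs (-1) [] ++ [s]]
  else segs

-- pass 2: build the dict from the segments that carry code lines ('seg[0]' = pyGetD seg 0)
def pvBuild (out : PySem.Dict String String) (segs : List (List String)) :
    PySem.Dict String String :=
  segs.foldl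
    (fun out seg =>
      if seg.length > 1 then
        out.insert (PySem.List.pyGetD seg 0 "")
          (PySem.Str.strip (PySem.Str.join "\n" seg) ++ "\n\n")
      else out)
    out

def parse_cheat_txt_alt (content : String) : List (String × String) :=
  let segs := (PySem.Str.splitlines content).foldl pvStepSeg []
  (pvBuild PySem.Dict.empty segs).items

-- ===== PRECONDITION & SPEC =====
def Spec_parse_cheat_txt (content : String) (out : List (String × String)) : Prop := out = parse_cheat_txt_alt content
instance (content : String) (out : List (String × String)) : Decidable (Spec_parse_cheat_txt content out) := by unfold Spec_parse_cheat_txt; infer_instance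

-- ===== CLAIM (what is proved, stated in full; the proofs are below) =====
def Claim_equal_parse_cheat_txt : Prop := ∀ (content : String), Dom_parse_cheat_txt content → Spec_parse_cheat_txt content (parse_cheat_txt content)

-- ===== LEMMAS AND PROOFS =====

theorem pvIsHeader_ne_empty {s : String} (h : pvIsHeader s = true) : s ≠ "" := by
  rintro rfl; exact absurd h (by decide)

-- pass 1 only touches the last segment or appends: a nonempty suffix evolves on its own
theorem pvStepSeg_append (lines : List String) (xs ys : List (List String)) (hys : ys ≠ []) :
    lines.foldl pvStepSeg (xs ++ ys) = xs ++ lines.foldl pvStepSeg ys := by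
  induction lines generalizing ys with
  | nil => rfl
  | cons line rest ih =>
    simp only [List.foldl_cons]
    by_cases h0 : PySem.Str.strip line = ""
    · rw [show pvStepSeg (xs ++ ys) line = xs ++ ys from by simp [pvStepSeg, h0],
        show pvStepSeg ys line = ys from by simp [pvStepSeg, h0]]
      exact ih ys hys
    · by_cases hh : pvIsHeader (PySem.Str.strip line) = true
      · rw [show pvStepSeg (xs ++ ys) line = xs ++ (ys ++ [[PySem.Str.strip line]]) from by
          simp [pvStepSeg, h0, hh],
          show pvStepSeg ys line = ys ++ [[PySem.Str.strip line]] from by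
            simp [pvStepSeg, h0, hh]]
        exact ih _ (by simp)
      · have hxys : xs ++ ys ≠ [] := by simp [hys]
        have key : PySem.List.pyGetD (xs ++ ys) (-1) [] = PySem.List.pyGetD ys (-1) [] := by
          rw [PySem.List.pyGetD_neg_one (xs ++ ys) [] hxys,
            PySem.List.pyGetD_neg_one ys [] hys]
          exact List.getLast_append_of_ne_nil hxys hys
        rw [show pvStepSeg (xs ++ ys) line
              = xs ++ (ys.dropLast ++ [PySem.List.pyGetD ys (-1) [] ++ [PySem.Str.strip line]])
            from by
            simp [pvStepSeg, h0, hh, hxys, key, List.dropLast_append_of_ne_nil hys,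
              List.append_assoc],
          show pvStepSeg ys line
              = ys.dropLast ++ [PySem.List.pyGetD ys (-1) [] ++ [PySem.Str.strip line]]
            from by simp [pvStepSeg, h0, hh, hys]]
        exact ih _ (by simp)

-- the open segment h :: t contributes to the dict exactly what flush() writes
theorem pvBuild_cons_flush (out : PySem.Dict String String) (h : String) (t : List String)
    (hh : pvIsHeader h = true) (segs : List (List String)) :
    pvBuild out ((h :: t) :: segs) = pvBuild (pvFlushA out (some h) (h :: t)) segs := by
  simp only [pvBuild, List.foldl_cons, PySem.List.pyGetD_zero_cons, pvFlushA]
  have hne := pvIsHeader_ne_empty hh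
  by_cases hl : (h :: t).length > 1
  · rw [if_pos hl, if_pos ⟨hne, hl⟩]
  · rw [if_neg hl, if_neg (by tauto)]

-- main invariant, active-segment case: A's state is (out, key = head, lines = the open segment)
theorem pv_main_some (lines : List String) (out : PySem.Dict String String)
    (h : String) (t : List String) (hh : pvIsHeader h = true) :
    pvFlushA (lines.foldl pvStepA (out, some h, h :: t)).1
        (lines.foldl pvStepA (out, some h, h :: t)).2.1
        (lines.foldl pvStepA (out, some h, h :: t)).2.2
      = pvBuild out (lines.foldl pvStepSeg [h :: t]) := by
  induction lines generalizing out h t with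
  | nil =>
    simp only [List.foldl_nil]
    exact (pvBuild_cons_flush out h t hh []).symm
  | cons line rest ih =>
    simp only [List.foldl_cons]
    by_cases h0 : PySem.Str.strip line = ""
    · rw [show pvStepA (out, some h, h :: t) line = (out, some h, h :: t) from by
        simp [pvStepA, h0],
        show pvStepSeg [h :: t] line = [h :: t] from by simp [pvStepSeg, h0]]
      exact ih out h t hh
    · by_cases hhd : pvIsHeader (PySem.Str.strip line) = true
      · rw [show pvStepA (out, some h, h :: t) line
              = (pvFlushA out (some h) (h :: t), some (PySem.Str.strip line),
                  [PySem.Str.strip line]) from by simp [pvStepA, h0, hhd],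
          show pvStepSeg [h :: t] line = [h :: t] ++ [[PySem.Str.strip line]] from by
            simp [pvStepSeg, h0, hhd],
          pvStepSeg_append rest [h :: t] [[PySem.Str.strip line]] (by simp),
          show [h :: t] ++ rest.foldl pvStepSeg [[PySem.Str.strip line]]
              = (h :: t) :: rest.foldl pvStepSeg [[PySem.Str.strip line]] from rfl,
          pvBuild_cons_flush out h t hh]
        exact ih _ _ [] hhd
      · rw [show pvStepA (out, some h, h :: t) line
              = (out, some h, h :: (t ++ [PySem.Str.strip line])) from by
            simp [pvStepA, h0, hhd, pvIsHeader_ne_empty hh],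
          show pvStepSeg [h :: t] line = [h :: (t ++ [PySem.Str.strip line])] from by
            simp [pvStepSeg, h0, hhd,
              PySem.List.pyGetD_neg_one [h :: t] ([] : List String) (by simp)]]
        exact ih out h (t ++ [PySem.Str.strip line]) hh

-- main invariant, no-open-segment case (before the first header)
theorem pv_main_none (lines : List String) (out : PySem.Dict String String) :
    pvFlushA (lines.foldl pvStepA (out, none, [])).1
        (lines.foldl pvStepA (out, none, [])).2.1
        (lines.foldl pvStepA (out, none, [])).2.2
      = pvBuild out (lines.foldl pvStepSeg []) := by
  induction lines with
  | nil => rfl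
  | cons line rest ih =>
    simp only [List.foldl_cons]
    by_cases h0 : PySem.Str.strip line = ""
    · rw [show pvStepA (out, none, []) line = (out, none, []) from by simp [pvStepA, h0],
        show pvStepSeg [] line = ([] : List (List String)) from by simp [pvStepSeg, h0]]
      exact ih
    · by_cases hhd : pvIsHeader (PySem.Str.strip line) = true
      · rw [show pvStepA (out, none, []) line
              = (out, some (PySem.Str.strip line), [PySem.Str.strip line]) from by
            simp [pvStepA, h0, hhd, pvFlushA],
          show pvStepSeg [] line = [[PySem.Str.strip line]] from by simp [pvStepSeg, h0, hhd]]
        exact pv_main_some rest out _ [] hhd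
      · rw [show pvStepA (out, none, []) line = (out, none, []) from by simp [pvStepA, h0, hhd],
          show pvStepSeg [] line = ([] : List (List String)) from by simp [pvStepSeg, h0, hhd]]
        exact ih

-- ===== VERDICT (by name: the statement is the Claim_ definition above) =====
theorem parse_cheat_txt_spec : Claim_equal_parse_cheat_txt := by
  intro content _
  exact congrArg PySem.Dict.items
    (pv_main_none (PySem.Str.splitlines content) PySem.Dict.empty)
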